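-- pv_equiv track=rewrite | github.com/gzwongkk/va-framework | apps/api/app/query_engine.py | _compute_hierarchy_depths
-- ===== SOURCE A (Python) =====
-- from typing import Any
--
-- def _compute_hierarchy_depths(nodes: list[dict[str, Any]]) -> dict[str, int]:
--     parent_by_id = {
--         str(node.get('id')): str(node.get('parent'))
--         for node in nodes
--         if node.get('id') is not None and node.get('parent') is not None
--     }
--     known_node_ids = {str(node.get('id')) for node in nodes if node.get('id') is not None}
--     depth_by_id: dict[str, int] = {}
--
--     def resolve_depth(node_id: str) -> int:
--         if node_id in depth_by_id:
--             return depth_by_id[node_id]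
--
--         parent_id = parent_by_id.get(node_id)
--         if parent_id is None or parent_id == node_id or parent_id not in known_node_ids:
--             depth_by_id[node_id] = 0
--             return 0
--
--         depth = resolve_depth(parent_id) + 1
--         depth_by_id[node_id] = depth
--         return depth
--
--     for node_id in known_node_ids:
--         resolve_depth(node_id)
--
--     return depth_by_id
-- ===== SOURCE B (Python) =====
-- from typing import Any
--
-- def _compute_hierarchy_depths(nodes: list[dict[str, Any]]) -> dict[str, int]:
--     # one pass builds both maps
--     parent_by_id: dict[str, str] = {}
--     known_node_ids = set()
--     for node in nodes:
--         nid = node.get('id')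
--         if nid is None:
--             continue
--         nid = str(nid)
--         known_node_ids.add(nid)
--         par = node.get('parent')
--         if par is not None:
--             parent_by_id[nid] = str(par)
--
--     depth_by_id: dict[str, int] = {}
--     for node_id in known_node_ids:
--         # the full ancestor chain of node_id, bottom-up, no memoization
--         chain = [node_id]
--         while True:
--             p = parent_by_id.get(chain[-1])
--             if p is None or p == chain[-1] or p not in known_node_ids:
--                 break
--             chain.append(p)
--         # the chain ends at a root, so the depth of each ancestor is its
--         # index from the root end; record the ones not seen yet
--         for depth, anc in enumerate(reversed(chain)):
--             if anc not in depth_by_id: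
--                 depth_by_id[anc] = depth
--     return depth_by_id
-- ===== Notes on version B (the rewrite author's own statement) =====
-- stated objective: alternative
-- what changed: The memoized recursive resolve_depth helper is replaced by a memo-free two-phase loop: for each node an iterative while loop collects its full ancestor chain up to the root, and a second loop assigns each not-yet-recorded chain member its index from the root end; the id/parent maps are also built in a single pass instead of two comprehensions.
import Mathlib
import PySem

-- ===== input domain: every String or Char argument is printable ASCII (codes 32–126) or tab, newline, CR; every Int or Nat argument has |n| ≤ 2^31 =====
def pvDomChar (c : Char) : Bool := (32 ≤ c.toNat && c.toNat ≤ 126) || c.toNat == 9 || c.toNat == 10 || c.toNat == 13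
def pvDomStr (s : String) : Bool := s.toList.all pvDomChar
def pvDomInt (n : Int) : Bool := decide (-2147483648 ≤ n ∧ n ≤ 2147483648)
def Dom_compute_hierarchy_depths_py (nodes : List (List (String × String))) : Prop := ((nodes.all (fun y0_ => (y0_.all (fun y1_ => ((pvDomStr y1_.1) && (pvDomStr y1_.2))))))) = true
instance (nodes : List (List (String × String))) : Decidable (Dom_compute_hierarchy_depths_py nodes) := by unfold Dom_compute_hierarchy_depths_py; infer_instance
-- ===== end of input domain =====

-- B replaces A's memoized recursion by a memo-free loop: it collects each node's full
-- ancestor chain iteratively and then records the missing depths root-first.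

-- ===== PORT A =====
-- A's two comprehensions: parent_by_id and known_node_ids.
def pvParentMap (nodes : List (List (String × String))) : PySem.Dict String String :=
  nodes.foldl (fun d node =>
    match (PySem.Dict.ofList node).get? "id", (PySem.Dict.ofList node).get? "parent" with
    | some i, some p => d.insert i p
    | _, _ => d) PySem.Dict.empty

def pvKnown (nodes : List (List (String × String))) : PySem.Set String :=
  nodes.foldl (fun s node =>
    match (PySem.Dict.ofList node).get? "id" with
    | some i => PySem.Set.add s i
    | none => s) PySem.Set.empty

-- A's resolve_depth, with a fuel guard for totality only (Pre_ excludes the parent cycles on which Python A recurses forever).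
def pvResolveA (parent : PySem.Dict String String) (known : PySem.Set String) :
    Nat → String → PySem.Dict String Int → Int × PySem.Dict String Int
  | 0, _, memo => (0, memo)
  | Nat.succ fuel, id, memo =>
    match memo.get? id with
    | some d => (d, memo)
    | none =>
      match parent.get? id with
      | none => (0, memo.insert id 0)
      | some p =>
        if p == id || !(PySem.Set.contains known p) then (0, memo.insert id 0)
        else
          let r := pvResolveA parent known fuel p memo
          (r.1 + 1, r.2.insert id (r.1 + 1))

def compute_hierarchy_depths_py (nodes : List (List (String × String))) : List (String × Int) :=
  let parent := pvParentMap nodes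
  let known := pvKnown nodes
  (known.foldl (fun memo id => (pvResolveA parent known (known.length + 1) id memo).2)
      PySem.Dict.empty).items

-- ===== PORT B =====
-- B's single pass building parent_by_id and known_node_ids together.
def pvMapsB (nodes : List (List (String × String))) : PySem.Dict String String × PySem.Set String :=
  nodes.foldl (fun st node =>
    match (PySem.Dict.ofList node).get? "id" with
    | none => st
    | some nid =>
      (match (PySem.Dict.ofList node).get? "parent" with
       | some par => st.1.insert nid par
       | none => st.1,
       PySem.Set.add st.2 nid)) (PySem.Dict.empty, PySem.Set.empty)

-- B's while loop: the full ancestor chain, bottom-up (fuel guard for totality only).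
def pvChain (parent : PySem.Dict String String) (known : PySem.Set String) :
    Nat → String → List String
  | 0, cur => [cur]
  | Nat.succ fuel, cur =>
    match parent.get? cur with
    | none => [cur]
    | some p =>
      if p == cur || !(PySem.Set.contains known p) then [cur]
      else cur :: pvChain parent known fuel p

-- B's `for depth, anc in enumerate(reversed(chain)): if anc not in depth_by_id: depth_by_id[anc] = depth`.
def pvRecord : PySem.Dict String Int → Int → List String → PySem.Dict String Int
  | memo, _, [] => memo
  | memo, d, x :: xs =>
    pvRecord (match memo.get? x with | some _ => memo | none => memo.insert x d) (d + 1) xs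

def compute_hierarchy_depths_py_alt (nodes : List (List (String × String))) : List (String × Int) :=
  let maps := pvMapsB nodes
  (maps.2.foldl (fun memo id =>
      pvRecord memo 0 (pvChain maps.1 maps.2 (maps.2.length + 1) id).reverse)
    PySem.Dict.empty).items

-- ===== PRECONDITION & SPEC =====
-- The single parent step of the hierarchy: none at a root (no parent, a self-loop,
-- or a parent that is not a known id).
def pvParentStep (nodes : List (List (String × String))) : String → Option String :=
  fun x =>
    match (pvParentMap nodes).get? x with
    | none => none
    | some p => if p = x ∨ p ∉ pvKnown nodes then none else some p

-- Pre_ excludes exactly the inputs whose parent links form a cycle of length ≥ 2 among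
-- known ids: there Python A raises RecursionError (and Python B loops forever), so A
-- returns no value. Stated mathematically: from every known id, the ancestor chain dies
-- out within |known| parent steps (a chain of distinct known ids can be no longer).
def Pre_compute_hierarchy_depths_py (nodes : List (List (String × String))) : Prop :=
  ∀ id ∈ pvKnown nodes,
    (fun o => Option.bind o (pvParentStep nodes))^[(pvKnown nodes).length] (some id) = none
instance (nodes : List (List (String × String))) : Decidable (Pre_compute_hierarchy_depths_py nodes) := by
  unfold Pre_compute_hierarchy_depths_py; infer_instance

def pvWitness_compute_hierarchy_depths_py : (List (List (String × String))) :=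
  [[("id", "a"), ("parent", "b")], [("id", "b")], [("id", "c"), ("parent", "a")]]

def Spec_compute_hierarchy_depths_py (nodes : List (List (String × String))) (out : List (String × Int)) : Prop := out = compute_hierarchy_depths_py_alt nodes
instance (nodes : List (List (String × String))) (out : List (String × Int)) : Decidable (Spec_compute_hierarchy_depths_py nodes out) := by unfold Spec_compute_hierarchy_depths_py; infer_instance

-- ===== CLAIM (what is proved, stated in full; the proofs are below) =====
def Claim_equal_compute_hierarchy_depths_py : Prop := ∀ (nodes : List (List (String × String))), Dom_compute_hierarchy_depths_py nodes → Pre_compute_hierarchy_depths_py nodes → Spec_compute_hierarchy_depths_py nodes (compute_hierarchy_depths_py nodes)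

-- ===== LEMMAS AND PROOFS =====

-- proof-side reformulation of Pre_: does the parent chain starting at `id`
-- reach a base node within the given number of steps?
def pvStops (parent : PySem.Dict String String) (known : PySem.Set String) : Nat → String → Bool
  | 0, _ => false
  | Nat.succ k, id =>
    match parent.get? id with
    | none => true
    | some p => if p == id || !(PySem.Set.contains known p) then true else pvStops parent known k p

-- a chain that dies out under the iterated parent step stops
theorem pvStops_of_iter (nodes : List (List (String × String))) :
    ∀ (f : Nat) (id : String),
      (fun o => Option.bind o (pvParentStep nodes))^[f] (some id) = none →
      pvStops (pvParentMap nodes) (pvKnown nodes) f id = true := by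
  intro f
  induction f with
  | zero => intro id h; simp at h
  | succ f ih =>
    intro id h
    rw [Function.iterate_succ_apply] at h
    simp only [Option.bind_some] at h
    simp only [pvStops]
    cases hp : (pvParentMap nodes).get? id with
    | none => rfl
    | some p =>
      dsimp only
      by_cases hb : (p == id || !(PySem.Set.contains (pvKnown nodes) p)) = true
      · rw [if_pos hb]
      · rw [if_neg hb]
        have hcond : ¬(p = id ∨ p ∉ pvKnown nodes) := by
          simp only [Bool.or_eq_true, beq_iff_eq, Bool.not_eq_eq_eq_not, Bool.not_true,
            not_or, not_not] at hb ⊢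
          push Not at hb
          obtain ⟨h1, h2⟩ := hb
          refine ⟨h1, ?_⟩
          have := PySem.Set.contains_iff (pvKnown nodes) p
          simp only [PySem.Set.contains_eq_listContains] at this h2
          exact this.mp (by simpa using h2)
        rw [pvParentStep, hp] at h
        dsimp only at h
        rw [if_neg hcond] at h
        exact ih p h

-- B's one-pass map building equals A's two comprehensions.
theorem pvMapsB_foldl (nodes : List (List (String × String)))
    (d : PySem.Dict String String) (s : PySem.Set String) :
    nodes.foldl (fun st node =>
      match (PySem.Dict.ofList node).get? "id" with
      | none => st
      | some nid =>
        (match (PySem.Dict.ofList node).get? "parent" with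
         | some par => st.1.insert nid par
         | none => st.1,
         PySem.Set.add st.2 nid)) (d, s) =
    (nodes.foldl (fun d node =>
      match (PySem.Dict.ofList node).get? "id", (PySem.Dict.ofList node).get? "parent" with
      | some i, some p => d.insert i p
      | _, _ => d) d,
     nodes.foldl (fun s node =>
      match (PySem.Dict.ofList node).get? "id" with
      | some i => PySem.Set.add s i
      | none => s) s) := by
  induction nodes generalizing d s with
  | nil => rfl
  | cons node rest ih =>
    simp only [List.foldl_cons]
    cases (PySem.Dict.ofList node).get? "id" with
    | none => exact ih d s
    | some nid =>
      cases (PySem.Dict.ofList node).get? "parent" with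
      | none => exact ih d (PySem.Set.add s nid)
      | some par => exact ih (d.insert nid par) (PySem.Set.add s nid)

theorem pvMapsB_eq (nodes : List (List (String × String))) :
    pvMapsB nodes = (pvParentMap nodes, pvKnown nodes) := by
  unfold pvMapsB pvParentMap pvKnown
  exact pvMapsB_foldl nodes PySem.Dict.empty PySem.Set.empty

-- stops is monotone in fuel and the chain is stable once it stops
theorem pvStops_mono (parent : PySem.Dict String String) (known : PySem.Set String) :
    ∀ f g x, f ≤ g → pvStops parent known f x = true → pvStops parent known g x = true := by
  intro f
  induction f with
  | zero => intro g x _ h; simp [pvStops] at h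
  | succ f ih =>
    intro g x hle h
    obtain ⟨g', rfl⟩ : ∃ g', g = g' + 1 := ⟨g - 1, by omega⟩
    simp only [pvStops] at h ⊢
    cases hp : parent.get? x with
    | none => rfl
    | some p =>
      rw [hp] at h
      dsimp only at h ⊢
      split_ifs at h ⊢ with hb
      · rfl
      · exact ih g' p (by omega) h

theorem pvChain_stable (parent : PySem.Dict String String) (known : PySem.Set String) :
    ∀ f g x, f ≤ g → pvStops parent known f x = true →
      pvChain parent known g x = pvChain parent known f x := by
  intro f
  induction f with
  | zero => intro g x _ h; simp [pvStops] at h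
  | succ f ih =>
    intro g x hle h
    obtain ⟨g', rfl⟩ : ∃ g', g = g' + 1 := ⟨g - 1, by omega⟩
    simp only [pvStops] at h
    simp only [pvChain]
    cases hp : parent.get? x with
    | none => rfl
    | some p =>
      rw [hp] at h
      dsimp only at h ⊢
      split_ifs at h ⊢ with hb
      · rfl
      · rw [ih g' p (by omega) h]

-- every tail of a chain is the chain of its head
theorem pvChain_drop (parent : PySem.Dict String String) (known : PySem.Set String) :
    ∀ f x, pvStops parent known f x = true →
      ∀ (i : Nat) (y : String), (pvChain parent known f x)[i]? = some y →
        pvStops parent known f y = true ∧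
        pvChain parent known f y = (pvChain parent known f x).drop i := by
  intro f
  induction f with
  | zero => intro x h; simp [pvStops] at h
  | succ f ih =>
    intro x hs i y hiy
    cases hp : parent.get? x with
    | none =>
      have hch : pvChain parent known (f + 1) x = [x] := by simp [pvChain, hp]
      rw [hch] at hiy ⊢
      cases i with
      | zero =>
        simp only [List.getElem?_cons_zero, Option.some.injEq] at hiy
        subst hiy
        exact ⟨hs, by rw [hch]; simp⟩
      | succ j => simp at hiy
    | some p =>
      by_cases hb : (p == x || !(PySem.Set.contains known p)) = true
      · have hch : pvChain parent known (f + 1) x = [x] := by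
          simp only [pvChain, hp]; rw [if_pos hb]
        rw [hch] at hiy ⊢
        cases i with
        | zero =>
          simp only [List.getElem?_cons_zero, Option.some.injEq] at hiy
          subst hiy
          exact ⟨hs, by rw [hch]; simp⟩
        | succ j => simp at hiy
      · have hsp : pvStops parent known f p = true := by
          simp only [pvStops, hp] at hs
          rwa [if_neg hb] at hs
        have hch : pvChain parent known (f + 1) x = x :: pvChain parent known f p := by
          simp only [pvChain, hp]
          rw [if_neg hb]
        rw [hch] at hiy ⊢
        cases i with
        | zero =>
          simp only [List.getElem?_cons_zero, Option.some.injEq] at hiy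
          subst hiy
          exact ⟨hs, by rw [hch]; simp⟩
        | succ j =>
          simp only [List.getElem?_cons_succ] at hiy
          simp only [List.drop_succ_cons]
          obtain ⟨h1, h2⟩ := ih p hsp j y hiy
          refine ⟨pvStops_mono parent known f (f + 1) y (by omega) h1, ?_⟩
          rw [pvChain_stable parent known f (f + 1) y (by omega) h1, h2]

-- pvRecord over an appended list splits
theorem pvRecord_append (l1 l2 : List String) :
    ∀ (memo : PySem.Dict String Int) (d : Int),
      pvRecord memo d (l1 ++ l2) = pvRecord (pvRecord memo d l1) (d + l1.length) l2 := by
  induction l1 with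
  | nil => intro memo d; simp [pvRecord]
  | cons x xs ih =>
    intro memo d
    simp only [List.cons_append, pvRecord, ih, List.length_cons]
    have harith : d + ((xs.length + 1 : Nat) : Int) = d + 1 + (xs.length : Int) := by
      push_cast; ring
    rw [harith]

-- pvRecord does nothing when every key is present
theorem pvRecord_skip (l : List String) :
    ∀ (memo : PySem.Dict String Int) (d : Int),
      (∀ y ∈ l, memo.get? y ≠ none) → pvRecord memo d l = memo := by
  induction l with
  | nil => intro memo d _; rfl
  | cons x xs ih =>
    intro memo d h
    have hx := h x (by simp)
    simp only [pvRecord]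
    cases hgx : memo.get? x with
    | none => exact absurd hgx hx
    | some v => exact ih memo (d + 1) (fun y hy => h y (by simp [hy]))

-- pvRecord leaves keys outside the list untouched
theorem pvRecord_get?_not_mem (l : List String) :
    ∀ (memo : PySem.Dict String Int) (d : Int) (y : String), y ∉ l →
      (pvRecord memo d l).get? y = memo.get? y := by
  induction l with
  | nil => intro memo d y _; rfl
  | cons x xs ih =>
    intro memo d y hy
    have hyx : y ≠ x := fun h => hy (by simp [h])
    have hyxs : y ∉ xs := fun h => hy (by simp [h])
    simp only [pvRecord]
    cases hgx : memo.get? x with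
    | some v => exact ih memo (d + 1) y hyxs
    | none =>
      rw [ih (memo.insert x d) (d + 1) y hyxs]
      exact PySem.Dict.get?_insert_of_ne memo d hyx

-- pvRecord preserves every existing entry
theorem pvRecord_preserves_some (l : List String) :
    ∀ (memo : PySem.Dict String Int) (d : Int) (y : String) (v : Int),
      memo.get? y = some v → (pvRecord memo d l).get? y = some v := by
  induction l with
  | nil => intro memo d y v h; exact h
  | cons x xs ih =>
    intro memo d y v h
    simp only [pvRecord]
    cases hgx : memo.get? x with
    | some w => exact ih memo (d + 1) y v h
    | none =>
      have hyx : y ≠ x := fun he => by rw [he] at h; rw [h] at hgx; cases hgx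
      exact ih (memo.insert x d) (d + 1) y v
        (by rw [PySem.Dict.get?_insert_of_ne memo d hyx]; exact h)

-- after pvRecord every key of the list has an entry
theorem pvRecord_covers (l : List String) :
    ∀ (memo : PySem.Dict String Int) (d : Int) (y : String), y ∈ l →
      (pvRecord memo d l).get? y ≠ none := by
  induction l with
  | nil => intro memo d y h; cases h
  | cons x xs ih =>
    intro memo d y hy
    simp only [pvRecord]
    cases hgx : memo.get? x with
    | some w =>
      rcases List.mem_cons.mp hy with rfl | hm
      · rw [pvRecord_preserves_some xs memo (d + 1) y w hgx]; simp
      · exact ih memo (d + 1) y hm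
    | none =>
      rcases List.mem_cons.mp hy with rfl | hm
      · rw [pvRecord_preserves_some xs (memo.insert y d) (d + 1) y d
            (PySem.Dict.get?_insert_self memo y d)]
        simp
      · exact ih (memo.insert x d) (d + 1) y hm

-- the memo invariant: every recorded entry is the true depth of a stopping node
-- whose whole ancestor chain is recorded
def pvInv (parent : PySem.Dict String String) (known : PySem.Set String) (F : Nat)
    (memo : PySem.Dict String Int) : Prop :=
  ∀ x d, memo.get? x = some d →
    pvStops parent known F x = true ∧
    d = ((pvChain parent known F x).length : Int) - 1 ∧
    ∀ y ∈ pvChain parent known F x, memo.get? y ≠ none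

-- inserting an entry keeps third-clause facts alive
theorem pvGet_insert_ne_none {memo : PySem.Dict String Int} {y k : String} {v : Int}
    (h : memo.get? y ≠ none) : (memo.insert k v).get? y ≠ none := by
  by_cases hk : y = k
  · subst hk; rw [PySem.Dict.get?_insert_self]; simp
  · rw [PySem.Dict.get?_insert_of_ne memo v hk]; exact h

-- the chain never revisits its starting node
theorem pvChain_not_mem_tail (parent : PySem.Dict String String) (known : PySem.Set String)
    (f : Nat) (id p : String) (hs : pvStops parent known f p = true)
    (hch : pvChain parent known (f + 1) id = id :: pvChain parent known f p) :
    id ∉ pvChain parent known f p := by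
  intro hmem
  obtain ⟨j, hj, hje⟩ := List.mem_iff_getElem.mp hmem
  obtain ⟨h1, h2⟩ := pvChain_drop parent known f p hs j id
    (by rw [List.getElem?_eq_getElem hj, hje])
  have hstab := pvChain_stable parent known f (f + 1) id (by omega) h1
  rw [hstab, h2] at hch
  have := congrArg List.length hch
  simp at this
  omega

-- the base-case memo update preserves the invariant
theorem pvInv_insert_base (parent : PySem.Dict String String) (known : PySem.Set String)
    (F f : Nat) (hF : f + 1 ≤ F) (id : String) (memo : PySem.Dict String Int)
    (hinv : pvInv parent known F memo)
    (hstop1 : pvStops parent known (f + 1) id = true)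
    (hch : pvChain parent known (f + 1) id = [id]) :
    pvInv parent known F (memo.insert id 0) := by
  intro x d hx
  by_cases hxid : x = id
  · subst hxid
    rw [PySem.Dict.get?_insert_self] at hx
    injection hx with hx
    have hstF : pvStops parent known F x = true :=
      pvStops_mono parent known (f + 1) F x hF hstop1
    have hchF : pvChain parent known F x = [x] := by
      rw [pvChain_stable parent known (f + 1) F x hF hstop1, hch]
    refine ⟨hstF, by simp [hchF, ← hx], ?_⟩
    intro y hy
    rw [hchF] at hy
    simp only [List.mem_singleton] at hy
    subst hy
    rw [PySem.Dict.get?_insert_self]; simp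
  · rw [PySem.Dict.get?_insert_of_ne memo 0 hxid] at hx
    obtain ⟨h1, h2, h3⟩ := hinv x d hx
    exact ⟨h1, h2, fun y hy => pvGet_insert_ne_none (h3 y hy)⟩

-- MAIN STEP: on a stopping node, A's memoized recursion produces exactly
-- B's record-the-reversed-chain step, and the invariant is preserved.
theorem pvStep (parent : PySem.Dict String String) (known : PySem.Set String) (F : Nat) :
    ∀ f, f ≤ F → ∀ id memo, pvStops parent known f id = true →
      pvInv parent known F memo →
      pvResolveA parent known f id memo =
        (((pvChain parent known f id).length : Int) - 1,
          pvRecord memo 0 (pvChain parent known f id).reverse) ∧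
      pvInv parent known F (pvRecord memo 0 (pvChain parent known f id).reverse) := by
  intro f
  induction f with
  | zero => intro _ id memo hs _; simp [pvStops] at hs
  | succ f ih =>
    intro hF id memo hs hinv
    cases hgid : memo.get? id with
    | some d =>
      -- memoized: A returns the cached value, B's record skips the whole chain
      obtain ⟨hstF, hdv, hall⟩ := hinv id d hgid
      have hchF : pvChain parent known F id = pvChain parent known (f + 1) id :=
        pvChain_stable parent known (f + 1) F id hF hs
      have hskip : pvRecord memo 0 (pvChain parent known (f + 1) id).reverse = memo := by
        apply pvRecord_skip
        intro y hy
        exact hall y (by rw [hchF]; exact List.mem_reverse.mp hy)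
      rw [hskip]
      refine ⟨?_, hinv⟩
      simp only [pvResolveA, hgid]
      rw [← hchF, ← hdv]
    | none =>
      cases hp : parent.get? id with
      | none =>
        -- base: chain is [id], record inserts id ↦ 0
        have hch : pvChain parent known (f + 1) id = [id] := by simp [pvChain, hp]
        have hstop1 : pvStops parent known (f + 1) id = true := by simp [pvStops, hp]
        have hrec : pvRecord memo 0 (pvChain parent known (f + 1) id).reverse =
            memo.insert id 0 := by
          simp [hch, pvRecord, hgid]
        rw [hrec]
        refine ⟨?_, pvInv_insert_base parent known F f hF id memo hinv hstop1 hch⟩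
        simp only [pvResolveA, hgid, hp, hch]
        norm_num
      | some p =>
        by_cases hb : (p == id || !(PySem.Set.contains known p)) = true
        · -- self-loop / unknown parent: same base case
          have hch : pvChain parent known (f + 1) id = [id] := by
            simp only [pvChain, hp]; rw [if_pos hb]
          have hstop1 : pvStops parent known (f + 1) id = true := by
            simp only [pvStops, hp]; rw [if_pos hb]
          have hrec : pvRecord memo 0 (pvChain parent known (f + 1) id).reverse =
              memo.insert id 0 := by
            simp [hch, pvRecord, hgid]
          rw [hrec]
          refine ⟨?_, pvInv_insert_base parent known F f hF id memo hinv hstop1 hch⟩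
          simp only [pvResolveA, hgid, hp, hb, if_true, hch]
          norm_num
        · -- recursive case
          have hsp : pvStops parent known f p = true := by
            simp only [pvStops, hp] at hs
            rwa [if_neg hb] at hs
          have hch : pvChain parent known (f + 1) id = id :: pvChain parent known f p := by
            simp only [pvChain, hp]
            rw [if_neg hb]
          obtain ⟨ihEq, ihInv⟩ := ih (by omega) p memo hsp hinv
          set M := pvRecord memo 0 (pvChain parent known f p).reverse with hM
          have hnot : id ∉ pvChain parent known f p :=
            pvChain_not_mem_tail parent known f id p hsp hch
          have hMid : M.get? id = none := by
            rw [hM, pvRecord_get?_not_mem _ memo 0 id (by simpa using hnot)]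
            exact hgid
          set L := (pvChain parent known f p).length with hL
          have hrec : pvRecord memo 0 (pvChain parent known (f + 1) id).reverse =
              M.insert id (L : Int) := by
            rw [hch]
            simp only [List.reverse_cons]
            rw [pvRecord_append]
            simp only [pvRecord, hMid, ← hM, List.length_reverse, ← hL, zero_add]
          rw [hrec]
          have hstop1 : pvStops parent known (f + 1) id = true := by
            simp only [pvStops, hp]
            rw [if_neg hb]
            exact hsp
          have hchFid : pvChain parent known F id = id :: pvChain parent known f p := by
            rw [pvChain_stable parent known (f + 1) F id hF hstop1, hch]
          constructor
          · simp only [pvResolveA, hgid, hp]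
            rw [if_neg hb]
            simp only [ihEq, hch, List.length_cons, ← hL, Prod.mk.injEq]
            refine ⟨by push_cast; ring, by congr 1; ring⟩
          · intro x d hx
            by_cases hxid : x = id
            · subst hxid
              rw [PySem.Dict.get?_insert_self] at hx
              injection hx with hx
              refine ⟨pvStops_mono parent known (f + 1) F x hF hstop1, ?_, ?_⟩
              · rw [hchFid, ← hx, List.length_cons, ← hL]
                push_cast; ring
              · intro y hy
                rw [hchFid] at hy
                rcases List.mem_cons.mp hy with rfl | hm
                · rw [PySem.Dict.get?_insert_self]; simp
                · exact pvGet_insert_ne_none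
                    (pvRecord_covers _ memo 0 y (by simpa using hm))
            · rw [PySem.Dict.get?_insert_of_ne M (L : Int) hxid] at hx
              obtain ⟨h1, h2, h3⟩ := ihInv x d hx
              exact ⟨h1, h2, fun y hy => pvGet_insert_ne_none (h3 y hy)⟩

-- the two folds agree step by step
theorem pvFold (parent : PySem.Dict String String) (known : PySem.Set String) (F : Nat) :
    ∀ (ids : List String) (memo : PySem.Dict String Int), pvInv parent known F memo →
      (∀ id ∈ ids, pvStops parent known F id = true) →
      ids.foldl (fun m id => (pvResolveA parent known F id m).2) memo =
      ids.foldl (fun m id => pvRecord m 0 (pvChain parent known F id).reverse) memo := by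
  intro ids
  induction ids with
  | nil => intro memo _ _; rfl
  | cons id rest ih =>
    intro memo hinv hstops
    obtain ⟨hEq, hInv⟩ := pvStep parent known F F (le_refl F) id memo
      (hstops id (by simp)) hinv
    simp only [List.foldl_cons, hEq]
    exact ih _ hInv (fun i hi => hstops i (by simp [hi]))

-- ===== VERDICT (by name: the statement is the Claim_ definition above) =====
theorem compute_hierarchy_depths_py_spec : Claim_equal_compute_hierarchy_depths_py := by
  intro nodes _ hpre
  unfold Spec_compute_hierarchy_depths_py compute_hierarchy_depths_py
    compute_hierarchy_depths_py_alt
  rw [pvMapsB_eq]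
  dsimp only
  congr 1
  exact pvFold (pvParentMap nodes) (pvKnown nodes) ((pvKnown nodes).length + 1)
    (pvKnown nodes) PySem.Dict.empty
    (fun x d hx => by rw [PySem.Dict.get?_empty] at hx; cases hx)
    (fun id hid =>
      pvStops_mono (pvParentMap nodes) (pvKnown nodes) (pvKnown nodes).length
        ((pvKnown nodes).length + 1) id (by omega)
        (pvStops_of_iter nodes (pvKnown nodes).length id (hpre id hid)))
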